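-- pv_equiv track=rewrite | github.com/JohnRobinSapan/Advent-of-Code | day_7_camel_cards/record_multiplier.py | card_type
-- ===== SOURCE A (Python) =====
-- from collections import Counter
--
-- def card_type(hand):
--     # Count the occurrences of each card in the hand
--     counts = Counter(hand)
--     score = []
--     wildcards = 0
--
--     # Iterate through the counts and handle wildcards ('J')
--     for card, count in counts.items():
--         if card == "J" and count < 5:
--             wildcards = count
--         else:
--             score.append(count)
--
--     # If there are wildcards, add them to the highest count
--     if wildcards:
--         score[score.index(max(score))] += wildcards
--
--     # Sort the score to match with the patterns below
--     score.sort()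
--     # Determine the type of hand based on the score pattern
--     match score:
--         case [5]:
--             return "Five of a kind"
--         case [1, 4]:
--             return "Four of a kind"
--         case [2, 3]:
--             return "Full house"
--         case [1, 1, 3]:
--             return "Three of a kind"
--         case [1, 2, 2]:
--             return "Two Pair"
--         case [1, 1, 1, 2]:
--             return "One Pair"
--         case _:
--             return "High card"
-- ===== SOURCE B (Python) =====
-- def card_type(hand):
--     # Sort the cards so equal cards form contiguous runs, then scan run lengths.
--     cards = sorted(hand)
--     runs = []
--     jokers = 0
--     n = len(cards)
--     i = 0
--     while i < n:
--         k = i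
--         while k < n and cards[k] == cards[i]:
--             k += 1
--         if cards[i] == "J" and k - i < 5:
--             jokers = k - i
--         else:
--             runs.append(k - i)
--         i = k
--     if jokers:
--         best = max(runs)
--         runs[runs.index(best)] = best + jokers
--     if sum(runs) != 5:
--         return "High card"
--     # sum of squares of the group sizes distinguishes the seven partitions of 5
--     names = {25: "Five of a kind", 17: "Four of a kind", 13: "Full house",
--              11: "Three of a kind", 9: "Two Pair", 7: "One Pair", 5: "High card"}
--     return names[sum(r * r for r in runs)]
-- ===== Notes on version B (the rewrite author's own statement) =====
-- stated objective: alternative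
-- what changed: B never builds a Counter or pattern-matches sorted count lists: it sorts the cards themselves, scans maximal runs of equal cards in one pass, and after adding the jokers to the largest run classifies by the sum of squares of the group sizes, which distinguishes the seven partitions of 5 via one table lookup.
import Mathlib
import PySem

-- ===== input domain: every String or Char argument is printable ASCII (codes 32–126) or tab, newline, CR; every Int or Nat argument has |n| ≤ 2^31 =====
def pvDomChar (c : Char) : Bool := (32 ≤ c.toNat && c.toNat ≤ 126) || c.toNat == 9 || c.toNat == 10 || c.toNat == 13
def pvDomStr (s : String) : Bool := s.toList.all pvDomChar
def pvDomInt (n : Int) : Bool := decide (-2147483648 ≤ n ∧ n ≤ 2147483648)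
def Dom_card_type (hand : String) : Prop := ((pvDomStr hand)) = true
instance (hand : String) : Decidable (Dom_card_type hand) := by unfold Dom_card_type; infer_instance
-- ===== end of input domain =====

-- B replaces A's Counter/sort/seven-pattern match by sorting the cards themselves, scanning
-- maximal runs, and classifying by the sum of squares of the group sizes: objective 'alternative'.

-- ===== PORT A =====
-- A's final `match score:` over seven literal sorted patterns:
def pvClassifyA (t : List Int) : String :=
  if t = [5] then "Five of a kind"
  else if t = [1, 4] then "Four of a kind"
  else if t = [2, 3] then "Full house"
  else if t = [1, 1, 3] then "Three of a kind"
  else if t = [1, 2, 2] then "Two Pair"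
  else if t = [1, 1, 1, 2] then "One Pair"
  else "High card"

def card_type (hand : String) : String :=
  let counts := PySem.Dict.counter hand.toList
  let st := counts.items.foldl
    (fun (p : List Int × Int) kv =>
      if kv.1 = 'J' ∧ kv.2 < 5 then (p.1, kv.2) else (p.1 ++ [kv.2], p.2)) ([], 0)
  let score := st.1
  let wildcards := st.2
  if wildcards ≠ 0 then
    match PySem.List.max? score (fun x => x) with
    | none => ""  -- Python raises ValueError (max of empty list); excluded by Pre_card_type
    | some m =>
      match PySem.List.index? score m with
      | none => ""  -- unreachable: m ∈ score
      | some i =>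
        pvClassifyA (PySem.List.sorted (score.set i (m + wildcards)) (fun x => x) false)
  else
    pvClassifyA (PySem.List.sorted score (fun x => x) false)

-- ===== PORT B =====
-- B's inner `while k` loop is the maximal run at position i (takeWhile); the outer `while i`
-- loop advances past it (dropWhile), appending run lengths / recording the joker run:
def pvScanB : List Char → List Int → Int → List Int × Int
  | [], runs, j => (runs, j)
  | c :: rest, runs, j =>
    let n : Int := 1 + ((rest.takeWhile (fun d => d = c)).length : Int)
    if c = 'J' ∧ n < 5 then pvScanB (rest.dropWhile (fun d => d = c)) runs n
    else pvScanB (rest.dropWhile (fun d => d = c)) (runs ++ [n]) j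
termination_by s _ _ => s.length
decreasing_by all_goals exact Nat.lt_succ_of_le (List.length_dropWhile_le _ _)

-- B's `names` dict literal:
def pvNames : PySem.Dict Int String :=
  PySem.Dict.ofList [(25, "Five of a kind"), (17, "Four of a kind"), (13, "Full house"),
    (11, "Three of a kind"), (9, "Two Pair"), (7, "One Pair"), (5, "High card")]

-- B's tail: total-size check, then the sum-of-squares table lookup:
def pvClassB (runs : List Int) : String :=
  if runs.sum ≠ 5 then "High card"
  else
    match pvNames.get? ((runs.map (fun r => r * r)).sum) with
    | some s => s
    | none => ""  -- Python KeyError; unreachable: positive group sizes summing to 5 hit the table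

def card_type_alt (hand : String) : String :=
  let cards := PySem.List.sorted hand.toList (fun c => c) false
  let st := pvScanB cards [] 0
  let runs := st.1
  let jokers := st.2
  if jokers ≠ 0 then
    match PySem.List.max? runs (fun x => x) with
    | none => ""  -- Python raises ValueError (max of empty list); excluded by Pre_card_type
    | some best =>
      match PySem.List.index? runs best with
      | none => ""  -- unreachable: best ∈ runs
      | some i => pvClassB (runs.set i (best + jokers))
  else pvClassB runs

-- ===== PRECONDITION & SPEC =====
-- Pre_ excludes exactly the hands on which A raises ValueError (max of an empty list):
-- nonempty hands of fewer than 5 cards consisting only of 'J'. B raises the same ValueError there.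
def Pre_card_type (hand : String) : Prop :=
  ¬ (hand.toList ≠ [] ∧ hand.toList.length < 5 ∧ ∀ c ∈ hand.toList, c = 'J')
instance (hand : String) : Decidable (Pre_card_type hand) := by unfold Pre_card_type; infer_instance

def pvWitness_card_type : String := "T55J5"

def Spec_card_type (hand : String) (out : String) : Prop := out = card_type_alt hand
instance (hand : String) (out : String) : Decidable (Spec_card_type hand out) := by unfold Spec_card_type; infer_instance

-- ===== CLAIM (what is proved, stated in full; the proofs are below) =====
def Claim_equal_card_type : Prop := ∀ (hand : String), Dom_card_type hand → Pre_card_type hand → Spec_card_type hand (card_type hand)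

-- ===== LEMMAS AND PROOFS =====

-- A's item loop, split into the appended scores and the wildcard count:
theorem pv_foldA_spec (l : List (Char × Int)) (acc : List Int) (w : Int) :
    l.foldl (fun (p : List Int × Int) kv =>
        if kv.1 = 'J' ∧ kv.2 < 5 then (p.1, kv.2) else (p.1 ++ [kv.2], p.2)) (acc, w)
    = (acc ++ (l.filter (fun kv => decide ¬(kv.1 = 'J' ∧ kv.2 < 5))).map Prod.snd,
       l.foldl (fun w kv => if kv.1 = 'J' ∧ kv.2 < 5 then kv.2 else w) w) := by
  induction l generalizing acc w with
  | nil => simp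
  | cons kv rest ih =>
    by_cases h : kv.1 = 'J' ∧ kv.2 < 5
    · simp [h, ih]
    · have h' : ¬kv.1 = 'J' ∨ 5 ≤ kv.2 := by
        rcases not_and_or.mp h with h1 | h2
        · exact Or.inl h1
        · exact Or.inr (by omega)
      simp [h, ih, h']

theorem pv_wild_spec (cnt : Char → Int) (K : List Char) (w : Int) :
    (K.map (fun k => (k, cnt k))).foldl
      (fun w kv => if kv.1 = 'J' ∧ kv.2 < 5 then kv.2 else w) w
    = if 'J' ∈ K ∧ cnt 'J' < 5 then cnt 'J' else w := by
  induction K generalizing w with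
  | nil => simp
  | cons k K ih =>
    by_cases hk : k = 'J'
    · subst hk
      by_cases h5 : cnt 'J' < 5
      · simp [h5, ih]
      · simp [h5, ih]
    · have hk' : ¬('J' = k) := fun h => hk h.symm
      simp [hk, hk', ih]

-- B's scan loop, split the same way (pvRunPairs labels each run with its character):
def pvRunPairs : List Char → List (Char × Int)
  | [] => []
  | c :: rest =>
    (c, 1 + ((rest.takeWhile (fun d => d = c)).length : Int)) :: pvRunPairs (rest.dropWhile (fun d => d = c))
termination_by s => s.length
decreasing_by exact Nat.lt_succ_of_le (List.length_dropWhile_le _ _)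

theorem pv_scanB_spec (s : List Char) (acc : List Int) (j : Int) :
    pvScanB s acc j
    = (acc ++ ((pvRunPairs s).filter (fun kv => decide ¬(kv.1 = 'J' ∧ kv.2 < 5))).map Prod.snd,
       (pvRunPairs s).foldl (fun w kv => if kv.1 = 'J' ∧ kv.2 < 5 then kv.2 else w) j) := by
  induction s using pvRunPairs.induct generalizing acc j with
  | case1 => simp [pvScanB, pvRunPairs]
  | case2 c rest ih =>
    rw [pvScanB, pvRunPairs]
    by_cases h : c = 'J' ∧ 1 + ((rest.takeWhile (fun d => d = c)).length : Int) < 5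
    · obtain ⟨hc, hn⟩ := h
      subst hc
      rw [if_pos ⟨rfl, hn⟩, ih]
      have h5 : ¬ (5 : Int) ≤ 1 + ((rest.takeWhile (fun d => d = 'J')).length : Int) := by omega
      simp [hn, h5]
    · have h' : ¬c = 'J' ∨ 5 ≤ 1 + ((rest.takeWhile (fun d => d = c)).length : Int) := by
        rcases not_and_or.mp h with h1 | h2
        · exact Or.inl h1
        · exact Or.inr (by omega)
      rw [if_neg h, ih]
      simp [h, h']

-- c does not survive its own dropWhile in a sorted list:
theorem pv_not_mem_dropWhile (c : Char) (rest : List Char)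
    (hp : rest.Pairwise (· ≤ ·)) (hle : ∀ x ∈ rest, c ≤ x) :
    c ∉ rest.dropWhile (fun d => d = c) := by
  induction rest with
  | nil => simp
  | cons x r ih =>
    by_cases hx : x = c
    · rw [List.dropWhile_cons_of_pos (by simp [hx])]
      exact ih (List.Pairwise.sublist (List.sublist_cons_self x r) hp)
        (fun y hy => hle y (List.mem_cons_of_mem x hy))
    · rw [List.dropWhile_cons_of_neg (by simp [hx])]
      intro hmem
      rcases List.mem_cons.mp hmem with h | h
      · exact hx h.symm
      · have h1 : c ≤ x := hle x (List.mem_cons_self)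
        have h2 : x ≤ c := (List.pairwise_cons.mp hp).1 c h
        exact hx (le_antisymm h2 h1)

-- on a sorted list, the run scan produces exactly (distinct card, its count), keys nodup:
theorem pv_runPairs_sorted (s : List Char) (hp : s.Pairwise (· ≤ ·)) :
    ∃ K : List Char, K.Nodup ∧ (∀ c, c ∈ K ↔ c ∈ s) ∧
      pvRunPairs s = K.map (fun k => (k, ((s.count k : Nat) : Int))) := by
  induction s using pvRunPairs.induct with
  | case1 => exact ⟨[], by simp, by simp, by simp [pvRunPairs]⟩
  | case2 c rest ih =>
    have hple : ∀ x ∈ rest, c ≤ x := (List.pairwise_cons.mp hp).1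
    have hprest : rest.Pairwise (· ≤ ·) := (List.pairwise_cons.mp hp).2
    have hpdw : (rest.dropWhile (fun d => d = c)).Pairwise (· ≤ ·) :=
      List.Pairwise.sublist (List.dropWhile_sublist _) hprest
    obtain ⟨K', hnd, hmem, heq⟩ := ih hpdw
    have hcdw : c ∉ rest.dropWhile (fun d => d = c) := pv_not_mem_dropWhile c rest hprest hple
    have htw : ∀ x ∈ rest.takeWhile (fun d => d = c), x = c := by
      intro x hx
      simpa using List.mem_takeWhile_imp hx
    have hsplit : rest.takeWhile (fun d => d = c) ++ rest.dropWhile (fun d => d = c) = rest :=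
      List.takeWhile_append_dropWhile
    -- count of c in the whole list is the run length
    have hc_tw : (rest.takeWhile (fun d => d = c)).count c = (rest.takeWhile (fun d => d = c)).length :=
      List.count_eq_length.mpr (fun b hb => (htw b hb).symm)
    have hc_dw : (rest.dropWhile (fun d => d = c)).count c = 0 := List.count_eq_zero.mpr hcdw
    have hcrest := congrArg (List.count c) hsplit
    rw [List.count_append, hc_tw, hc_dw] at hcrest
    have hccount : ((c :: rest).count c : Int) = 1 + ((rest.takeWhile (fun d => d = c)).length : Int) := by
      rw [List.count_cons_self]
      push_cast
      omega
    -- counts of surviving keys agree between the tail and the whole list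
    have hkcount : ∀ k ∈ K', ((c :: rest).count k) = (rest.dropWhile (fun d => d = c)).count k := by
      intro k hk
      have hkdw : k ∈ rest.dropWhile (fun d => d = c) := (hmem k).mp hk
      have hkc : k ≠ c := fun h => hcdw (h ▸ hkdw)
      have hk_tw : (rest.takeWhile (fun d => d = c)).count k = 0 :=
        List.count_eq_zero.mpr (fun hx => hkc (htw k hx))
      have h1 : (c :: rest).count k = rest.count k := by
        simp [Ne.symm hkc]
      have h2 := congrArg (List.count k) hsplit
      rw [List.count_append, hk_tw] at h2
      omega
    refine ⟨c :: K', ?_, ?_, ?_⟩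
    · exact List.nodup_cons.mpr ⟨fun h => hcdw ((hmem c).mp h), hnd⟩
    · intro x
      constructor
      · intro hx
        rcases List.mem_cons.mp hx with h | h
        · exact h ▸ List.mem_cons_self
        · exact List.mem_cons_of_mem c (List.dropWhile_sublist _ |>.mem ((hmem x).mp h))
      · intro hx
        rcases List.mem_cons.mp hx with h | h
        · exact h ▸ List.mem_cons_self
        · rw [← hsplit] at h
          rcases List.mem_append.mp h with h | h
          · exact (htw x h) ▸ List.mem_cons_self
          · exact List.mem_cons_of_mem c ((hmem x).mpr h)
    · rw [pvRunPairs, heq, List.map_cons]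
      congr 1
      · exact congrArg (fun z => (c, z)) hccount.symm
      · apply List.map_congr_left
        intro k hk
        rw [hkcount k hk]

set_option maxHeartbeats 1000000 in
-- the pattern match and the sum-of-squares lookup agree on sorted lists of positive sizes:
theorem pv_classAB (t : List Int) (hs : t.Pairwise (· ≤ ·)) (h1 : ∀ v ∈ t, 1 ≤ v) :
    pvClassifyA t = pvClassB t := by
  by_cases hsum : t.sum = 5
  · rcases t with _ | ⟨a, t⟩
    · simp at hsum
    rcases t with _ | ⟨b, t⟩
    · have ha := h1 a (by simp)
      have : a = 5 := by simp at hsum; omega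
      subst this; decide
    rcases t with _ | ⟨c, t⟩
    · have ha := h1 a (by simp); have hb := h1 b (by simp)
      have hab : a ≤ b := by simp [List.pairwise_cons] at hs; omega
      have h5 : a + b = 5 := by simp at hsum; omega
      have hd : (a = 1 ∧ b = 4) ∨ (a = 2 ∧ b = 3) := by omega
      rcases hd with ⟨h₁, h₂⟩ | ⟨h₁, h₂⟩ <;> (subst h₁; subst h₂; decide)
    rcases t with _ | ⟨d, t⟩
    · have ha := h1 a (by simp); have hb := h1 b (by simp); have hc := h1 c (by simp)
      have hord : a ≤ b ∧ a ≤ c ∧ b ≤ c := by simp [List.pairwise_cons] at hs; omega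
      have h5 : a + b + c = 5 := by simp at hsum; omega
      have hd : (a = 1 ∧ b = 1 ∧ c = 3) ∨ (a = 1 ∧ b = 2 ∧ c = 2) := by omega
      rcases hd with ⟨h₁, h₂, h₃⟩ | ⟨h₁, h₂, h₃⟩ <;> subst h₁ <;> subst h₂ <;> subst h₃ <;> decide
    rcases t with _ | ⟨e, t⟩
    · have ha := h1 a (by simp); have hb := h1 b (by simp)
      have hc := h1 c (by simp); have hd := h1 d (by simp)
      have hord : a ≤ b ∧ a ≤ c ∧ a ≤ d ∧ b ≤ c ∧ b ≤ d ∧ c ≤ d := by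
        simp [List.pairwise_cons] at hs; omega
      have h5 : a + b + c + d = 5 := by simp at hsum; omega
      have he : a = 1 ∧ b = 1 ∧ c = 1 ∧ d = 2 := by omega
      obtain ⟨h₁, h₂, h₃, h₄⟩ := he
      subst h₁; subst h₂; subst h₃; subst h₄; decide
    rcases t with _ | ⟨f, t⟩
    · have ha := h1 a (by simp); have hb := h1 b (by simp); have hc := h1 c (by simp)
      have hd := h1 d (by simp); have he := h1 e (by simp)
      have h5 : a + b + c + d + e = 5 := by simp at hsum; omega
      have hz : a = 1 ∧ b = 1 ∧ c = 1 ∧ d = 1 ∧ e = 1 := by omega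
      obtain ⟨h₁, h₂, h₃, h₄, h₅⟩ := hz
      subst h₁; subst h₂; subst h₃; subst h₄; subst h₅; decide
    · -- six or more positive entries cannot sum to 5
      exfalso
      have ha := h1 a (by simp); have hb := h1 b (by simp); have hc := h1 c (by simp)
      have hd := h1 d (by simp); have he := h1 e (by simp); have hf := h1 f (by simp)
      have ht : 0 ≤ t.sum := List.sum_nonneg (fun x hx => le_trans (by norm_num) (h1 x (by simp [hx])))
      simp at hsum
      omega
  · -- both sides fall through to "High card"
    have hA : pvClassifyA t = "High card" := by
      unfold pvClassifyA
      split_ifs <;> simp_all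
    have hB : pvClassB t = "High card" := by
      unfold pvClassB
      rw [if_pos hsum]
    rw [hA, hB]

theorem pv_classB_perm (l l' : List Int) (h : l.Perm l') : pvClassB l = pvClassB l' := by
  unfold pvClassB
  rw [h.sum_eq, (h.map (fun r => r * r)).sum_eq]

theorem pv_set_at (pre suf : List Int) (m v : Int) :
    (pre ++ m :: suf).set pre.length v = pre ++ v :: suf := by
  induction pre with
  | nil => rfl
  | cons p pre ih => simp [ih]

theorem pv_entries_pos (xs l : List Char) (hsub : ∀ k ∈ l, k ∈ xs) :
    ∀ v ∈ l.map (fun k => ((xs.count k : Nat) : Int)), 1 ≤ v := by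
  intro v hv
  simp only [List.mem_map] at hv
  obtain ⟨k, hk, rfl⟩ := hv
  exact_mod_cast List.count_pos_iff.mpr (hsub k hk)

-- the common tail of both ports: wildcard merge then classification, over perm-equal group lists
theorem pv_tail_eq (score runs : List Int) (w : Int) (hp : runs.Perm score)
    (hpos : ∀ v ∈ score, 1 ≤ v) (hne : w ≠ 0 → score ≠ []) (hwpos : w ≠ 0 → 1 ≤ w) :
    (if w ≠ 0 then
        match PySem.List.max? score (fun x => x) with
        | none => ""
        | some m =>
          match PySem.List.index? score m with
          | none => ""
          | some i => pvClassifyA (PySem.List.sorted (score.set i (m + w)) (fun x => x) false)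
      else pvClassifyA (PySem.List.sorted score (fun x => x) false))
    = (if w ≠ 0 then
        match PySem.List.max? runs (fun x => x) with
        | none => ""
        | some m =>
          match PySem.List.index? runs m with
          | none => ""
          | some i => pvClassB (runs.set i (m + w))
      else pvClassB runs) := by
  have hposr : ∀ v ∈ runs, 1 ≤ v := fun v hv => hpos v (hp.mem_iff.mp hv)
  by_cases hw : w ≠ 0
  · rw [if_pos hw, if_pos hw]
    have hsne : score ≠ [] := hne hw
    have hw1 : 1 ≤ w := hwpos hw
    have hrne : runs ≠ [] := fun h => hsne (by simpa [h] using hp)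
    rcases hmaxs : PySem.List.max? score (fun x => x) with _ | m
    · exact absurd ((PySem.List.max?_eq_none_iff _ _).mp hmaxs) hsne
    rcases hmaxr : PySem.List.max? runs (fun x => x) with _ | m'
    · exact absurd ((PySem.List.max?_eq_none_iff _ _).mp hmaxr) hrne
    have hmems : m ∈ score := PySem.List.max?_mem hmaxs
    have hubs : ∀ y ∈ score, y ≤ m := PySem.List.max?_isMax hmaxs
    have hmemr : m' ∈ runs := PySem.List.max?_mem hmaxr
    have hubr : ∀ y ∈ runs, y ≤ m' := PySem.List.max?_isMax hmaxr
    have hmm : m' = m :=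
      le_antisymm (hubs m' (hp.mem_iff.mp hmemr)) (hubr m (hp.mem_iff.mpr hmems))
    subst hmm
    rcases hidxs : PySem.List.index? score m' with _ | i
    · exact absurd hmems ((PySem.List.index?_eq_none_iff _ _).mp hidxs)
    rcases hidxr : PySem.List.index? runs m' with _ | i'
    · exact absurd hmemr ((PySem.List.index?_eq_none_iff _ _).mp hidxr)
    obtain ⟨preS, sufS, hdS, hlS, hnS⟩ := (PySem.List.index?_eq_some_iff _ _ _).mp hidxs
    obtain ⟨preR, sufR, hdR, hlR, hnR⟩ := (PySem.List.index?_eq_some_iff _ _ _).mp hidxr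
    have hsetS : score.set i (m' + w) = preS ++ (m' + w) :: sufS := by
      rw [hdS, ← hlS, pv_set_at]
    have hsetR : runs.set i' (m' + w) = preR ++ (m' + w) :: sufR := by
      rw [hdR, ← hlR, pv_set_at]
    have heraseS : score.erase m' = preS ++ sufS := by
      rw [hdS, List.erase_append_right _ (by simpa using hnS), List.erase_cons_head]
    have heraseR : runs.erase m' = preR ++ sufR := by
      rw [hdR, List.erase_append_right _ (by simpa using hnR), List.erase_cons_head]
    have hpm : (score.set i (m' + w)).Perm (runs.set i' (m' + w)) := by
      rw [hsetS, hsetR]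
      refine List.perm_middle.trans (List.Perm.trans ?_ List.perm_middle.symm)
      apply List.Perm.cons
      rw [← heraseS, ← heraseR]
      exact (hp.erase m').symm
    have hposm : ∀ v ∈ score.set i (m' + w), 1 ≤ v := by
      intro v hv
      rw [hsetS] at hv
      rcases List.mem_append.mp hv with h | h
      · exact hpos v (hdS ▸ List.mem_append_left _ h)
      · rcases List.mem_cons.mp h with h | h
        · have := hpos m' hmems
          have hw1 : 1 ≤ w ∨ w ≤ -1 := by omega
          -- w is a nonzero count recorded from a run, hence ≥ 1 is not known here; use m' + w ≥ 1?
          -- we only know w ≠ 0; but in both programs w is a positive count. We avoid needing it: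
          -- m' + w ≥ 1 is required for pv_classAB.
          exact h ▸ (by omega)
        · exact hpos v (hdS ▸ List.mem_append_right _ (List.mem_cons_of_mem _ h))
    dsimp only
    rw [hidxs, hidxr]
    dsimp only
    rw [pv_classAB _ (PySem.List.sorted_pairwise _ _)
        (fun v hv => hposm v ((PySem.List.mem_sorted _ _ _ _).mp hv)),
      pv_classB_perm _ _ (((PySem.List.sorted_perm _ _ _).trans hpm))]
  · rw [if_neg hw, if_neg hw]
    rw [pv_classAB _ (PySem.List.sorted_pairwise _ _)
        (fun v hv => hpos v ((PySem.List.mem_sorted _ _ _ _).mp hv)),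
      pv_classB_perm _ _ ((PySem.List.sorted_perm _ _ _).trans hp.symm)]

-- ===== VERDICT (by name: the statement is the Claim_ definition above) =====
theorem card_type_spec : Claim_equal_card_type := by
  intro hand _dom hpre
  unfold Pre_card_type at hpre
  unfold Spec_card_type card_type card_type_alt
  dsimp only
  rw [PySem.Dict.items_counter, pv_foldA_spec, pv_scanB_spec]
  obtain ⟨K, hKnd, hKmem, hKeq⟩ :=
    pv_runPairs_sorted (PySem.List.sorted hand.toList (fun c => c) false)
      (PySem.List.sorted_pairwise _ _)
  rw [hKeq]
  have hcq : ∀ k : Char,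
      (PySem.List.sorted hand.toList (fun c => c) false).count k = hand.toList.count k :=
    fun k => (PySem.List.sorted_perm _ _ _).count_eq k
  simp only [hcq]
  rw [pv_wild_spec, pv_wild_spec]
  simp only [List.filter_map, List.map_map, List.nil_append, Function.comp_def]
  have hJK : ('J' ∈ K) = ('J' ∈ PySem.Set.ofList hand.toList) := propext (by
    rw [hKmem, (PySem.List.sorted_perm hand.toList (fun c => c) false).mem_iff]
    exact (PySem.Set.mem_ofList _ _).symm)
  simp only [hJK]
  have hKS : K.Perm (PySem.Set.ofList hand.toList) := by
    refine (List.perm_ext_iff_of_nodup hKnd (PySem.Set.nodup_ofList _)).mpr ?_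
    intro a
    rw [hKmem, (PySem.List.sorted_perm hand.toList (fun c => c) false).mem_iff]
    exact (PySem.Set.mem_ofList _ _).symm
  refine pv_tail_eq _ _ _ (List.Perm.map _ (List.Perm.filter _ hKS)) ?_ ?_ ?_
  · exact pv_entries_pos hand.toList _ (fun k hk =>
      (PySem.Set.mem_ofList _ _).mp (List.mem_of_mem_filter hk))
  · intro hw h0
    by_cases hJ : 'J' ∈ PySem.Set.ofList hand.toList ∧ ((hand.toList.count 'J' : Nat) : Int) < 5
    · rw [List.map_eq_nil_iff, List.filter_eq_nil_iff] at h0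
      have hallJ : ∀ ch ∈ hand.toList, ch = 'J' := by
        intro ch hch
        have := h0 ch ((PySem.Set.mem_ofList _ _).mpr hch)
        simp at this
        exact this.1
      have hJx : 'J' ∈ hand.toList := (PySem.Set.mem_ofList _ _).mp hJ.1
      have hlen : hand.toList.count 'J' = hand.toList.length :=
        List.count_eq_length.mpr (fun b hb => (hallJ b hb).symm)
      have hlt : ((hand.toList.count 'J' : Nat) : Int) < 5 := hJ.2
      exact hpre ⟨List.ne_nil_of_mem hJx, by omega, hallJ⟩
    · exact hw (if_neg hJ)
  · intro hw
    by_cases hJ : 'J' ∈ PySem.Set.ofList hand.toList ∧ ((hand.toList.count 'J' : Nat) : Int) < 5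
    · rw [if_pos hJ]
      have : 'J' ∈ hand.toList := (PySem.Set.mem_ofList _ _).mp hJ.1
      exact_mod_cast List.count_pos_iff.mpr this
    · exact absurd (if_neg hJ) hw
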